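-- pv_equiv track=rewrite | github.com/edg96/PracticeSession | practicesession07.py | exercise_7
-- ===== SOURCE A (Python) =====
-- def exercise_7(files: list[str]) -> dict[str, str]:
--     """
--     Finds the corresponding path of each file based on its extension.
--
--     Parameters:
--         files (list[str]): A list of file names.
--
--     Returns:
--         dict[str, str]: A dictionary with each file (key) and its corresponding path (value).
--     """
--     paths = {
--         'C://Downloads//Images': ['jpg', 'png', 'jpeg'],
--         'C://Downloads//Text': ['txt'],
--         'C://Downloads//Python_files': ['py'],
--         'C://Downloads//PDF': ['pdf'],
--     }
--
--     files_and_extensions = {file: file[file.rfind('.') + 1:]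
--                             for file in files
--                             for path, extension in paths.items()
--                             if file[file.rfind('.') + 1:] in extension}
--
--     return files_and_extensions
-- ===== SOURCE B (Python) =====
-- def exercise_7(files: list[str]) -> dict[str, str]:
--     paths = {
--         'C://Downloads//Images': ['jpg', 'png', 'jpeg'],
--         'C://Downloads//Text': ['txt'],
--         'C://Downloads//Python_files': ['py'],
--         'C://Downloads//PDF': ['pdf'],
--     }
--     valid = set().union(*paths.values())
--
--     def ext_of(name):
--         return name[name.rfind('.') + 1:]
--
--     # staged pipeline: filter, then ordered first-occurrence dedup, then map
--     kept = list(dict.fromkeys(name for name in files if ext_of(name) in valid))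
--     return {name: ext_of(name) for name in kept}
-- ===== Notes on version B (the rewrite author's own statement) =====
-- stated objective: faster
-- what changed: B replaces A's nested dict-comprehension (per-file inner scan over paths.items() with dict-overwrite handling duplicates) by a staged pipeline: flatten paths.values() into one extension set, filter files once, explicitly dedup kept names in first-occurrence order with dict.fromkeys, then map each unique name to its extension.
import Mathlib
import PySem

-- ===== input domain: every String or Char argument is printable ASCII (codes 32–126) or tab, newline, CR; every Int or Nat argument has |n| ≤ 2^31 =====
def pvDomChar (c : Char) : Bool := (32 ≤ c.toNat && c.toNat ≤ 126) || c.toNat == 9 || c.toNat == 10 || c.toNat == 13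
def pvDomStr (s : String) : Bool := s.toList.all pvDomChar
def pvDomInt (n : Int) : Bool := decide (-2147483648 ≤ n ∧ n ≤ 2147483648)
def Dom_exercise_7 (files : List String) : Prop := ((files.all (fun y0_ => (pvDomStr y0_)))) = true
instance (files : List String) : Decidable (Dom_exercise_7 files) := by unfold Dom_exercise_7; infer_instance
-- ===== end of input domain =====

-- B replaces A's nested dict comprehension by a staged filter → ordered-dedup → map pipeline.

-- ===== PORT A =====
-- the literal 'paths' dict of A, as an insertion-ordered association list
def pathsA : List (String × List String) :=
  [("C://Downloads//Images", ["jpg", "png", "jpeg"]),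
   ("C://Downloads//Text", ["txt"]),
   ("C://Downloads//Python_files", ["py"]),
   ("C://Downloads//PDF", ["pdf"])]

-- the dict comprehension: outer loop over files, inner loop over paths.items()
def exercise_7 (files : List String) : List (String × String) :=
  (files.foldl (fun d file =>
      pathsA.foldl (fun d pe =>
          let ext := PySem.Str.slice file (some (PySem.Str.rfind file "." + 1)) none
          if pe.2.contains ext then d.insert file ext else d) d)
    PySem.Dict.empty).items

-- ===== PORT B =====
def pathsB : List (String × List String) :=
  [("C://Downloads//Images", ["jpg", "png", "jpeg"]),
   ("C://Downloads//Text", ["txt"]),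
   ("C://Downloads//Python_files", ["py"]),
   ("C://Downloads//PDF", ["pdf"])]

-- valid = set().union(*paths.values())
def validB : PySem.Set String :=
  pathsB.foldl (fun s pe => PySem.Set.union s (PySem.Set.ofList pe.2)) PySem.Set.empty

-- ext_of(name) = name[name.rfind('.') + 1:]
def extOf (name : String) : String :=
  PySem.Str.slice name (some (PySem.Str.rfind name "." + 1)) none

def exercise_7_alt (files : List String) : List (String × String) :=
  let kept := PySem.List.dedup (files.filter (fun name => PySem.Set.contains validB (extOf name)))
  (kept.foldl (fun d name => d.insert name (extOf name)) PySem.Dict.empty).items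

-- ===== PRECONDITION & SPEC =====
def Spec_exercise_7 (files : List String) (out : List (String × String)) : Prop := out = exercise_7_alt files
instance (files : List String) (out : List (String × String)) : Decidable (Spec_exercise_7 files out) := by unfold Spec_exercise_7; infer_instance

-- ===== CLAIM (what is proved, stated in full; the proofs are below) =====
def Claim_equal_exercise_7 : Prop := ∀ (files : List String), Dom_exercise_7 files → Spec_exercise_7 files (exercise_7 files)

-- ===== LEMMAS AND PROOFS =====

-- A's inner loop over paths.items() collapses to one membership test in B's flattened set
lemma inner_step_eq (d : PySem.Dict String String) (file : String) :
    pathsA.foldl (fun d pe =>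
        let ext := PySem.Str.slice file (some (PySem.Str.rfind file "." + 1)) none
        if pe.2.contains ext then d.insert file ext else d) d
      =
    (if PySem.Set.contains validB (extOf file) then d.insert file (extOf file) else d) := by
  simp only [pathsA, List.foldl, validB, pathsB, extOf, PySem.Set.ofList, PySem.Set.union,
    PySem.Set.contains_eq_listContains, PySem.Set.empty, List.contains_eq_mem,
    List.mem_cons, List.not_mem_nil, or_false, decide_eq_true_eq]
  split_ifs <;> simp_all

-- inserting a key already mapped to its extension leaves the dict unchanged
lemma insert_mem_eq (d : PySem.Dict String String) (ks : List String) (f : String)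
    (h : d.items = ks.map (fun k => (k, extOf k))) (hf : f ∈ ks) :
    d.insert f (extOf f) = d := by
  apply PySem.Dict.ext
  have hc : d.contains f = true := by
    rw [PySem.Dict.contains_eq_decide_mem_keys]
    simp [PySem.Dict.keys, h, hf]
  rw [PySem.Dict.items_insert_of_contains _ _ hc, h, List.map_map]
  apply List.map_congr_left
  intro x _
  by_cases hx : x = f
  · subst hx; simp
  · simp [Function.comp, hx]

-- the invariant of A's outer loop: its dict is the kept-so-far keys mapped to their extensions
lemma foldA_items (files : List String) (d : PySem.Dict String String) (ks : List String)
    (h : d.items = ks.map (fun k => (k, extOf k))) (hnd : ks.Nodup) :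
    (files.foldl (fun d file =>
        if PySem.Set.contains validB (extOf file) then d.insert file (extOf file) else d) d).items
      =
    (PySem.Set.update ks (files.filter (fun name => PySem.Set.contains validB (extOf name)))).map
      (fun k => (k, extOf k)) := by
  induction files generalizing d ks with
  | nil => simpa [PySem.Set.update] using h
  | cons f rest ih =>
    simp only [List.foldl]
    by_cases hc : PySem.Set.contains validB (extOf f) = true
    · rw [if_pos hc, List.filter_cons, if_pos hc, PySem.Set.update_cons]
      by_cases hf : f ∈ ks
      · rw [insert_mem_eq d ks f h hf]
        have hadd : PySem.Set.add ks f = ks := by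
          simp [PySem.Set.add, PySem.Set.contains_eq_listContains, hf]
        rw [hadd]
        exact ih d ks h hnd
      · have hadd : PySem.Set.add ks f = ks ++ [f] := by
          simp [PySem.Set.add, PySem.Set.contains_eq_listContains, hf]
        rw [hadd]
        apply ih
        · have hcf : d.contains f = false := by
            rw [PySem.Dict.contains_eq_decide_mem_keys]
            simp [PySem.Dict.keys, h, hf]
          rw [PySem.Dict.items_insert_of_not_contains _ _ hcf, h]
          simp
        · rw [List.nodup_append]
          refine ⟨hnd, List.nodup_singleton f, ?_⟩
          intro a ha
          simp only [List.mem_singleton]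
          rintro b rfl rfl
          exact hf ha
    · rw [if_neg hc, List.filter_cons, if_neg hc]
      exact ih d ks h hnd

-- B's final comprehension runs over fresh distinct keys, so it is a plain map
lemma foldB_items (kept : List String) (hnd : kept.Nodup) :
    (kept.foldl (fun d name => d.insert name (extOf name)) PySem.Dict.empty).items
      = kept.map (fun name => (name, extOf name)) := by
  have := PySem.Dict.items_foldl_insert_fresh (l := kept) (d := PySem.Dict.empty)
    (k := fun a => a) (v := fun a => extOf a)
    (by intro a _; exact PySem.Dict.contains_empty a)
    (by simpa using hnd)
  simpa using this

-- ===== VERDICT (by name: the statement is the Claim_ definition above) =====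
theorem exercise_7_spec : Claim_equal_exercise_7 := by
  intro files _
  unfold Spec_exercise_7 exercise_7 exercise_7_alt
  have hstep : (fun (d : PySem.Dict String String) file =>
      pathsA.foldl (fun d pe =>
          let ext := PySem.Str.slice file (some (PySem.Str.rfind file "." + 1)) none
          if pe.2.contains ext then d.insert file ext else d) d)
      = (fun (d : PySem.Dict String String) file =>
          if PySem.Set.contains validB (extOf file) then d.insert file (extOf file) else d) := by
    funext d file; exact inner_step_eq d file
  rw [hstep, foldA_items files PySem.Dict.empty [] rfl List.nodup_nil,
    PySem.Set.update_nil_left, PySem.List.dedup_eq_ofList,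
    foldB_items _ (by exact PySem.Set.nodup_ofList _)]
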